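-- pv_equiv track=rewrite | github.com/dj0107/code_practice | Python/heap.py | isRightmost
-- ===== SOURCE A (Python) =====
-- def isRightmost(n: int) -> bool:
--     # 1, 3, 7... 처럼 n+1이 2의 거듭제곱 형태라면 true
--     if n < 1:
--         return False
--     n = n + 1
--     while n > 1:
--         if n % 2 != 0: return False
--         n = n // 2
--     return True
-- ===== SOURCE B (Python) =====
-- def isRightmost(n: int) -> bool:
--     # n is "rightmost" iff n+1 is a power of two; closed-form bit test.
--     if n < 1:
--         return False
--     m = n + 1
--     return (m & (m - 1)) == 0
-- ===== Notes on version B (the rewrite author's own statement) =====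
-- stated objective: idiomatic
-- what changed: Replaces the repeated halve-and-check-parity loop with the standard O(1) bit trick m & (m-1) == 0 testing whether n+1 is a power of two, keeping the n < 1 guard.
import Mathlib
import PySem

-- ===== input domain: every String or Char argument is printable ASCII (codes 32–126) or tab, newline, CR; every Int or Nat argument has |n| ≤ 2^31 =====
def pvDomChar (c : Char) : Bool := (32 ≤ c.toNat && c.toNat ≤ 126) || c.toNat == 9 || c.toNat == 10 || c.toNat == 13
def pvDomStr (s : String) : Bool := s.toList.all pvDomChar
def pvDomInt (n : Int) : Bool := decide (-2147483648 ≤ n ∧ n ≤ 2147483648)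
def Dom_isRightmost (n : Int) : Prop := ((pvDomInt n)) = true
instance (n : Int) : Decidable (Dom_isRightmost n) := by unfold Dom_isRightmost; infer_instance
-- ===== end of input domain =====

-- B replaces A's halve-and-check-parity loop by the closed-form bit test (n+1) & n == 0 (idiomatic power-of-two check).

-- ===== PORT A =====
-- the 'while n > 1' loop of A, on the rebound variable n (here m)
def isRightmostLoop (m : Int) : Bool :=
  if _h : 1 < m then
    if PySem.Int.mod m 2 ≠ 0 then false
    else isRightmostLoop (PySem.Int.floordiv m 2)
  else true
termination_by m.toNat
decreasing_by
  have h2 : PySem.Int.floordiv m 2 = m / 2 := PySem.Int.floordiv_eq_ediv_of_pos (by omega)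
  have : 0 ≤ m / 2 := Int.ediv_nonneg (by omega) (by omega)
  have : m / 2 < m := by omega
  omega

def isRightmost (n : Int) : Bool :=
  if n < 1 then false
  else isRightmostLoop (n + 1)

-- ===== PORT B =====
-- Python's '&' on ints is two's-complement bitwise and; Mathlib's Int.land is exactly that.
def isRightmost_alt (n : Int) : Bool :=
  if n < 1 then false
  else
    let m := n + 1
    Int.land m (m - 1) == 0

-- ===== PRECONDITION & SPEC =====
def Spec_isRightmost (n : Int) (out : Bool) : Prop := out = isRightmost_alt n
instance (n : Int) (out : Bool) : Decidable (Spec_isRightmost n out) := by unfold Spec_isRightmost; infer_instance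

-- ===== CLAIM (what is proved, stated in full; the proofs are below) =====
def Claim_equal_isRightmost : Prop := ∀ (n : Int), Dom_isRightmost n → Spec_isRightmost n (isRightmost n)

-- ===== LEMMAS AND PROOFS =====

theorem land_natCast (a b : Nat) : Int.land (a : Int) (b : Int) = ((a &&& b : Nat) : Int) := rfl

-- key: on positive naturals, A's loop computes the m & (m-1) == 0 test
theorem loop_eq_land (k : Nat) (hk : 1 ≤ k) :
    isRightmostLoop (k : Int) = ((k &&& (k - 1)) == 0) := by
  induction k using Nat.strong_induction_on with
  | _ k ih =>
    rcases Nat.lt_or_ge k 2 with h2 | h2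
    · -- k = 1
      interval_cases k
      rw [isRightmostLoop]
      norm_num
    · rcases Nat.even_or_odd k with ⟨a, ha⟩ | ⟨a, ha⟩
      · -- k = 2*a, a ≥ 1
        have ha1 : 1 ≤ a := by omega
        have hmod : PySem.Int.mod (k : Int) 2 = 0 := by
          have h := PySem.Int.mod_natCast k 2
          have h2 : k % 2 = 0 := by omega
          exact_mod_cast h2 ▸ h
        have hdiv : PySem.Int.floordiv (k : Int) 2 = (a : Int) := by
          have h := PySem.Int.floordiv_natCast k 2
          have h2 : k / 2 = a := by omega
          exact_mod_cast h2 ▸ h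
        rw [isRightmostLoop]
        simp only [show (1:Int) < (k:Int) by exact_mod_cast (by omega : (1:Nat) < k), dite_true,
          hmod, hdiv]
        simp only [ne_eq, not_true_eq_false, if_false]
        rw [ih a (by omega) ha1]
        -- (2a) &&& (2a-1) = 2*(a &&& (a-1))
        have hbit : k &&& (k - 1) = 2 * (a &&& (a - 1)) := by
          have : k = Nat.bit false a := by simp [Nat.bit_val]; omega
          have h1 : k - 1 = Nat.bit true (a - 1) := by simp [Nat.bit_val]; omega
          rw [h1, this, Nat.land_bit]
          simp [Nat.bit_val]
        rw [hbit]
        simp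
      · -- k = 2*a + 1, a ≥ 1
        have ha1 : 1 ≤ a := by omega
        have hmod : PySem.Int.mod (k : Int) 2 = 1 := by
          have h := PySem.Int.mod_natCast k 2
          have h2 : k % 2 = 1 := by omega
          exact_mod_cast h2 ▸ h
        rw [isRightmostLoop]
        simp only [show (1:Int) < (k:Int) by exact_mod_cast (by omega : (1:Nat) < k), dite_true,
          hmod]
        simp only [ne_eq, one_ne_zero, not_false_eq_true, if_true]
        have hbit : k &&& (k - 1) = 2 * a := by
          have h0 : k = Nat.bit true a := by simp [Nat.bit_val]; omega
          have h1 : k - 1 = Nat.bit false a := by simp [Nat.bit_val]; omega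
          rw [h1, h0, Nat.land_bit]
          simp [Nat.bit_val]
        rw [hbit]
        simp; omega

-- ===== VERDICT (by name: the statement is the Claim_ definition above) =====
theorem isRightmost_spec : Claim_equal_isRightmost := by
  intro n _
  unfold Spec_isRightmost isRightmost isRightmost_alt
  by_cases hn : n < 1
  · simp [hn]
  · simp only [hn, if_false]
    push Not at hn
    set k : Nat := (n + 1).toNat with hk
    have hcast : (n + 1 : Int) = (k : Int) := by omega
    have hk2 : 2 ≤ k := by omega
    have hcast1 : (n + 1 - 1 : Int) = ((k - 1 : Nat) : Int) := by omega
    rw [hcast]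
    rw [loop_eq_land k (by omega)]
    show _ = (Int.land (k : Int) ((k:Int) - 1) == 0)
    have : ((k:Int) - 1) = ((k - 1 : Nat) : Int) := by omega
    rw [this, land_natCast]
    rcases Nat.eq_zero_or_pos (k &&& (k-1)) with h | h
    · simp [h]
    · simp [Nat.pos_iff_ne_zero.mp h]
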